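-- pv_equiv track=rewrite | github.com/DrakeAaditya/Competitive_Programs | cell_complete() --- Eight Neighbouring houses.py | cellCompete
-- ===== SOURCE A (Python) =====
-- def cellCompete(states, days):
--     # WRITE YOUR CODE HERE
--     temp = []
--     inactive = 0
--     active = 1
--     for i in range(days):
--         del temp
--         temp = []
--         for i in range(len(states)):
--             if i == 0:
--                 if states[i+1] == inactive:
--                     temp.append(inactive)
--                 if states[i+1] == active:
--                     temp.append(active)
--             elif i == len(states) - 1:
--                 if states[i-1] == inactive:
--                     temp.append(inactive)
--                 if states[i-1] == active:
--                     temp.append(active)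
--             else:
--                 if states[i-1] == states[i+1]:
--                     temp.append(inactive)
--                 else:
--                     temp.append(active)
--         states = temp
--
--
--     return states
-- ===== SOURCE B (Python) =====
-- def cellCompete(states, days):
--     # Cycle detection: the step map on a fixed-size binary state space is deterministic,
--     # so once a state repeats we jump ahead with the remaining days taken modulo the period.
--     def step(s):
--         if len(s) < 2:
--             return list(s)
--         inner = [int(s[i - 1] != s[i + 1]) for i in range(1, len(s) - 1)]
--         return [s[1]] + inner + [s[-2]]
--
--     seen = {}
--     cur = list(states)
--     t = 0
--     while t < days:
--         key = tuple(cur)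
--         if key in seen:
--             period = t - seen[key]
--             for _ in range((days - t) % period):
--                 cur = step(cur)
--             return cur
--         seen[key] = t
--         cur = step(cur)
--         t += 1
--     return cur
-- ===== Notes on version B (the rewrite author's own statement) =====
-- stated objective: alternative
-- what changed: B replaces A's day-by-day simulation with cycle detection (memoize every seen state, on the first repeat jump ahead by the remaining days modulo the period, so at most transient+period steps are simulated); Pre_ restricts to the puzzle's natural domain where the boundary-neighbour cells s[1] and s[-2] are binary (and no singleton state with days >= 1, where A raises IndexError) -- outside it A silently drops boundary cells whose neighbour is not exactly 0 or 1, an accident of its equality tests, while B applies the neighbour rule as written.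
-- outside the precondition, e.g. on cellCompete([0, 5, 1], 1): A returns [1], B returns [5, 1, 5]; on cellCompete([1], 2): A raises IndexError, B returns [1]
import Mathlib
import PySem

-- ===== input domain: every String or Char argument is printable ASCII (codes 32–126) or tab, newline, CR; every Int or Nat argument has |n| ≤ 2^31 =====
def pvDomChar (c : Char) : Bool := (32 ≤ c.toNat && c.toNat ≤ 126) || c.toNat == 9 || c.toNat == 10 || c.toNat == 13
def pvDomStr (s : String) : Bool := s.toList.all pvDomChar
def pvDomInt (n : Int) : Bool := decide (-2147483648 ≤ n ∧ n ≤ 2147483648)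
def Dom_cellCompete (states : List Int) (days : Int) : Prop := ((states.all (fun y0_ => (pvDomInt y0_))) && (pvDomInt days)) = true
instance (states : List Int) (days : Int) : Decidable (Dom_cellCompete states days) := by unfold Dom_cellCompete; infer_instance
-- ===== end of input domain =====

-- B replaces A's day-by-day simulation with cycle detection on the finite binary state space,
-- jumping ahead with the remaining days taken modulo the detected period (same exact results on Pre_).


-- ===== PORT A =====
-- inner loop of A (one day); indexing via pyGetD is exact on Pre_, where every access is in range
def innerA (states : List Int) : List Int :=
  (PySem.List.pyRange 0 (PySem.List.len states) 1).foldl (fun temp i =>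
    if i = 0 then
      let temp := if PySem.List.pyGetD states (i + 1) 0 = 0 then temp ++ [(0 : Int)] else temp
      let temp := if PySem.List.pyGetD states (i + 1) 0 = 1 then temp ++ [(1 : Int)] else temp
      temp
    else if i = PySem.List.len states - 1 then
      let temp := if PySem.List.pyGetD states (i - 1) 0 = 0 then temp ++ [(0 : Int)] else temp
      let temp := if PySem.List.pyGetD states (i - 1) 0 = 1 then temp ++ [(1 : Int)] else temp
      temp
    else
      if PySem.List.pyGetD states (i - 1) 0 = PySem.List.pyGetD states (i + 1) 0 then temp ++ [(0 : Int)]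
      else temp ++ [(1 : Int)]) []

def cellCompete (states : List Int) (days : Int) : List Int :=
  (PySem.List.pyRange 0 days 1).foldl (fun st _ => innerA st) states

-- ===== PORT B =====
-- Source B's step: small states are copied; otherwise first cell copies s[1], middle cells become
-- int(s[i-1] != s[i+1]), last cell copies s[-2]
def stepB (s : List Int) : List Int :=
  if PySem.List.len s < 2 then s
  else
    [PySem.List.pyGetD s 1 0]
    ++ (PySem.List.pyRange 1 (PySem.List.len s - 1) 1).map (fun i =>
        if PySem.List.pyGetD s (i - 1) 0 ≠ PySem.List.pyGetD s (i + 1) 0 then (1 : Int) else 0)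
    ++ [PySem.List.pyGetD s (-2) 0]

-- Source B's while loop; `rem` counts the remaining iterations (days - t), the seen-dict values are
-- the times t (always < current t when looked up, so Nat subtraction `t - t0` is Python's `t - seen[key]`)
def loopB : Nat → PySem.Dict (List Int) Nat → Nat → List Int → List Int
  | 0, _, _, cur => cur
  | rem + 1, seen, t, cur =>
    match seen.get? cur with
    | some t0 => stepB^[(rem + 1) % (t - t0)] cur   -- for _ in range((days - t) % period): cur = step(cur)
    | none => loopB rem (seen.insert cur t) (t + 1) (stepB cur)

def cellCompete_alt (states : List Int) (days : Int) : List Int :=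
  loopB days.toNat PySem.Dict.empty 0 states

-- ===== PRECONDITION & SPEC =====
-- Pre_ restricts to the puzzle's natural domain: the boundary-neighbour cells s[1] and s[-2]
-- must be binary (0/1) and no single-cell state when days ≥ 1 (there Python A raises
-- IndexError). When a boundary-neighbour cell is not binary, A silently DROPS that boundary
-- cell (its equality tests against 0 and 1 both fail), an accident of its implementation.
def Pre_cellCompete (states : List Int) (days : Int) : Prop :=
  days ≤ 0 ∨ (states.length ≠ 1 ∧ (states = [] ∨
    ((states.getD 1 0 = 0 ∨ states.getD 1 0 = 1) ∧
     (states.getD (states.length - 2) 0 = 0 ∨ states.getD (states.length - 2) 0 = 1))))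
instance (states : List Int) (days : Int) : Decidable (Pre_cellCompete states days) := by
  unfold Pre_cellCompete; infer_instance

def pvWitness_cellCompete : List Int × Int := ([1, 0, 1, 1, 0], 4)

def Spec_cellCompete (states : List Int) (days : Int) (out : List Int) : Prop := out = cellCompete_alt states days
instance (states : List Int) (days : Int) (out : List Int) : Decidable (Spec_cellCompete states days out) := by unfold Spec_cellCompete; infer_instance

-- ===== CLAIM (what is proved, stated in full; the proofs are below) =====
def Claim_equal_cellCompete : Prop := ∀ (states : List Int) (days : Int), Dom_cellCompete states days → Pre_cellCompete states days → Spec_cellCompete states days (cellCompete states days)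

-- ===== LEMMAS AND PROOFS =====

-- generic: a foldl that ignores the list elements is function iteration
theorem foldl_ignore_iterate {α β : Type} (f : α → α) (l : List β) :
    ∀ x : α, l.foldl (fun s _ => f s) x = f^[l.length] x := by
  induction l with
  | nil => intro x; rfl
  | cons a t ih =>
    intro x
    simp only [List.foldl_cons, List.length_cons, ih (f x)]
    rw [Function.iterate_succ_apply]

-- A's outer loop is iteration of innerA
theorem cellCompete_eq_iterate (states : List Int) (days : Int) :
    cellCompete states days = innerA^[days.toNat] states := by
  unfold cellCompete
  rw [foldl_ignore_iterate, PySem.List.length_pyRange_one]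
  norm_num

-- if f^[p] x = x then iterates of f at x repeat with period p
theorem iterate_mod_of_periodic {α : Type} (f : α → α) (x : α) (p : Nat) (hp : 0 < p)
    (hper : f^[p] x = x) : ∀ m, f^[m % p] x = f^[m] x := by
  intro m
  induction m using Nat.strong_induction_on with
  | _ m ih =>
    by_cases h : m < p
    · rw [Nat.mod_eq_of_lt h]
    · have h1 : f^[m] x = f^[m - p] x := by
        conv_lhs => rw [show m = (m - p) + p by omega]
        rw [Function.iterate_add_apply, hper]
      rw [Nat.mod_eq_sub_mod (by omega), ih (m - p) (by omega), h1]

-- cycle-detection loop correctness: under the invariant that every recorded state leads to the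
-- current one in (now) - (recorded time) steps, loopB computes plain iteration
theorem loopB_eq_iterate (rem : Nat) : ∀ (seen : PySem.Dict (List Int) Nat) (t : Nat) (cur : List Int),
    (∀ k v, seen.get? k = some v → v < t ∧ stepB^[t - v] k = cur) →
    loopB rem seen t cur = stepB^[rem] cur := by
  induction rem with
  | zero => intro seen t cur _; rfl
  | succ rem ih =>
    intro seen t cur hinv
    unfold loopB
    cases hg : seen.get? cur with
    | some t0 =>
      obtain ⟨hlt, hper⟩ := hinv cur t0 hg
      simp only []
      exact iterate_mod_of_periodic stepB cur (t - t0) (by omega) hper (rem + 1)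
    | none =>
      simp only []
      rw [ih (seen.insert cur t) (t + 1) (stepB cur) ?_, ← Function.iterate_succ_apply]
      intro k v hk
      rw [PySem.Dict.get?_insert] at hk
      split at hk
      · rename_i hkc
        subst hkc
        obtain rfl : t = v := by injection hk
        exact ⟨Nat.lt_succ_self t, by simp⟩
      · obtain ⟨hv, hiter⟩ := hinv k v hk
        refine ⟨by omega, ?_⟩
        rw [show t + 1 - v = (t - v) + 1 by omega, Function.iterate_succ_apply', hiter]

-- the per-index chunk A's inner loop appends
def gA (s : List Int) (i : Int) : List Int :=
  if i = 0 then
    (if PySem.List.pyGetD s (i + 1) 0 = 0 then [(0 : Int)] else []) ++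
    (if PySem.List.pyGetD s (i + 1) 0 = 1 then [(1 : Int)] else [])
  else if i = PySem.List.len s - 1 then
    (if PySem.List.pyGetD s (i - 1) 0 = 0 then [(0 : Int)] else []) ++
    (if PySem.List.pyGetD s (i - 1) 0 = 1 then [(1 : Int)] else [])
  else
    [if PySem.List.pyGetD s (i - 1) 0 = PySem.List.pyGetD s (i + 1) 0 then (0 : Int) else 1]

-- A's boundary branch: two sequential conditional appends, as one appended chunk
theorem let_chunk (acc : List Int) (c1 c2 : Prop) [Decidable c1] [Decidable c2] :
    (let temp := if c1 then acc ++ [(0 : Int)] else acc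
     let temp := if c2 then temp ++ [(1 : Int)] else temp
     temp) = acc ++ ((if c1 then [(0 : Int)] else []) ++ (if c2 then [(1 : Int)] else [])) := by
  by_cases h1 : c1 <;> by_cases h2 : c2 <;>
    simp only [h1, h2, ite_true, ite_false, List.append_assoc, List.append_nil, List.nil_append]

theorem innerA_eq_flatMap (s : List Int) :
    innerA s = (PySem.List.pyRange 0 (PySem.List.len s) 1).flatMap (gA s) := by
  unfold innerA
  refine (PySem.List.foldl_congr_mem _ _ (fun temp i => temp ++ gA s i) _ ?_).trans ?_
  · intro acc x _
    show _ = acc ++ gA s x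
    unfold gA
    by_cases h0 : x = 0
    · simp only [if_pos h0]
      exact let_chunk acc _ _
    · by_cases h1 : x = PySem.List.len s - 1
      · simp only [if_neg h0, if_pos h1]
        exact let_chunk acc _ _
      · simp only [if_neg h0, if_neg h1]
        split_ifs <;> rfl
  · rw [PySem.List.foldl_append_eq_flatMap]
    simp only [List.nil_append]

-- A's two sequential conditional appends at a boundary collapse to one copied cell when it is binary
theorem two_if_chunk_bin (p : Int) (hp : p = 0 ∨ p = 1) :
    ((if p = 0 then [(0 : Int)] else []) ++ (if p = 1 then [(1 : Int)] else [])) = [p] := by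
  rcases hp with rfl | rfl <;> decide

theorem flatMap_eq_map_of (l : List Int) (g : Int → List Int) (h : Int → Int)
    (hgh : ∀ x ∈ l, g x = [h x]) : l.flatMap g = l.map h := by
  induction l with
  | nil => rfl
  | cons a t ih =>
    simp only [List.flatMap_cons, List.map_cons, hgh a (by simp),
      ih (fun x hx => hgh x (by simp [hx])), List.singleton_append]

-- one day of A equals Source B's step when the two boundary-neighbour cells are binary
theorem innerA_eq_stepB_of_len (s : List Int) (hn2 : (2 : Int) ≤ PySem.List.len s)
    (h1b : s.getD 1 0 = 0 ∨ s.getD 1 0 = 1)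
    (h2b : s.getD (s.length - 2) 0 = 0 ∨ s.getD (s.length - 2) 0 = 1) : innerA s = stepB s := by
  have hsplit : PySem.List.pyRange 0 (PySem.List.len s) 1 =
      [0] ++ PySem.List.pyRange 1 (PySem.List.len s - 1) 1 ++ [PySem.List.len s - 1] := by
    rw [PySem.List.pyRange_one_append 0 (PySem.List.len s - 1) (PySem.List.len s) (by omega) (by omega),
      PySem.List.pyRange_one_cons (show (0 : Int) < PySem.List.len s - 1 by omega)]
    have hlast := PySem.List.pyRange_one_singleton (PySem.List.len s - 1)
    rw [show PySem.List.len s - 1 + 1 = PySem.List.len s by ring] at hlast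
    rw [hlast]
    norm_num
  rw [innerA_eq_flatMap, hsplit, List.flatMap_append, List.flatMap_append]
  simp only [List.flatMap_cons, List.flatMap_nil, List.append_nil]
  have hmid : (PySem.List.pyRange 1 (PySem.List.len s - 1) 1).flatMap (gA s) =
      (PySem.List.pyRange 1 (PySem.List.len s - 1) 1).map (fun i =>
        if PySem.List.pyGetD s (i - 1) 0 ≠ PySem.List.pyGetD s (i + 1) 0 then (1 : Int) else 0) := by
    apply flatMap_eq_map_of
    intro x hx
    rw [PySem.List.mem_pyRange_one] at hx
    unfold gA
    rw [if_neg (by omega), if_neg (by omega)]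
    by_cases heq : PySem.List.pyGetD s (x - 1) 0 = PySem.List.pyGetD s (x + 1) 0 <;> simp [heq]
  have hlen : PySem.List.len s = (s.length : Int) := PySem.List.len_eq s
  have h1eq : PySem.List.pyGetD s 1 0 = s.getD 1 0 := by
    rw [show (1 : Int) = ((1 : Nat) : Int) by norm_num, PySem.List.pyGetD_natCast]
  have hleq : PySem.List.pyGetD s (PySem.List.len s - 2) 0 = s.getD (s.length - 2) 0 := by
    rw [hlen, show (s.length : Int) - 2 = ((s.length - 2 : Nat) : Int) by omega,
      PySem.List.pyGetD_natCast]
  have hleft : gA s 0 = [PySem.List.pyGetD s 1 0] := by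
    unfold gA
    rw [if_pos rfl, show (0 : Int) + 1 = 1 by norm_num]
    exact two_if_chunk_bin _ (h1eq ▸ h1b)
  have hright : gA s (PySem.List.len s - 1) = [PySem.List.pyGetD s (PySem.List.len s - 2) 0] := by
    unfold gA
    rw [if_neg (by omega), if_pos rfl, show PySem.List.len s - 1 - 1 = PySem.List.len s - 2 by ring]
    exact two_if_chunk_bin _ (hleq ▸ h2b)
  have hneg : PySem.List.pyGetD s (-2) 0 = PySem.List.pyGetD s (PySem.List.len s - 2) 0 := by
    rw [PySem.List.pyGetD_neg_ofNat s 2 0 (by omega) (by omega), hlen,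
      show (s.length : Int) - 2 = ((s.length - 2 : Nat) : Int) by omega,
      PySem.List.pyGetD_natCast, List.getD_eq_getElem _ _ (by omega)]
  rw [hmid, hleft, hright]
  unfold stepB
  rw [if_neg (by omega), hneg]

-- every cell of a step of a state with binary boundary-neighbour cells is binary
-- (the endpoints copy those two cells, the middle cells are 0/1 by construction)
theorem stepB_binary (s : List Int) (hn2 : 2 ≤ s.length)
    (h1b : s.getD 1 0 = 0 ∨ s.getD 1 0 = 1)
    (h2b : s.getD (s.length - 2) 0 = 0 ∨ s.getD (s.length - 2) 0 = 1) :
    ∀ x ∈ stepB s, x = 0 ∨ x = 1 := by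
  intro x hx
  unfold stepB at hx
  rw [if_neg (by simp [PySem.List.len_eq]; omega)] at hx
  simp only [List.mem_append, List.mem_singleton, List.mem_map] at hx
  rcases hx with (hx | ⟨i, -, hi⟩) | hx
  · subst hx
    rw [show (1 : Int) = ((1 : Nat) : Int) by norm_num, PySem.List.pyGetD_natCast]
    exact h1b
  · split at hi <;> omega
  · subst hx
    rw [PySem.List.pyGetD_neg_ofNat s 2 0 (by omega) (by omega),
      ← List.getD_eq_getElem _ 0 (by omega)]
    exact h2b

-- a step preserves the length
theorem stepB_length (s : List Int) : (stepB s).length = s.length := by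
  unfold stepB
  split
  · rfl
  · rename_i hn
    have hlen : PySem.List.len s = (s.length : Int) := PySem.List.len_eq s
    simp only [List.length_append, List.length_map, List.length_singleton,
      PySem.List.length_pyRange_one]
    omega

-- a fully binary state of length ≥ 2 has binary boundary-neighbour cells
theorem bin_boundary (s : List Int) (hn2 : 2 ≤ s.length) (hb : ∀ x ∈ s, x = 0 ∨ x = 1) :
    (s.getD 1 0 = 0 ∨ s.getD 1 0 = 1) ∧
    (s.getD (s.length - 2) 0 = 0 ∨ s.getD (s.length - 2) 0 = 1) := by
  constructor
  · exact hb _ (by rw [List.getD_eq_getElem _ _ (by omega)]; exact List.getElem_mem _)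
  · exact hb _ (by rw [List.getD_eq_getElem _ _ (by omega)]; exact List.getElem_mem _)

-- the trajectories of A's day and Source B's step agree once the state is fully binary
theorem traj_eq_bin (d : Nat) : ∀ s : List Int, 2 ≤ s.length → (∀ x ∈ s, x = 0 ∨ x = 1) →
    innerA^[d] s = stepB^[d] s := by
  induction d with
  | zero => intro s _ _; rfl
  | succ d ih =>
    intro s hn2 hb
    obtain ⟨h1b, h2b⟩ := bin_boundary s hn2 hb
    rw [Function.iterate_succ_apply, Function.iterate_succ_apply,
      innerA_eq_stepB_of_len s (by simp [PySem.List.len_eq]; omega) h1b h2b]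
    exact ih (stepB s) (by rw [stepB_length]; exact hn2) (stepB_binary s hn2 h1b h2b)

-- the trajectories agree on every state admitted by Pre_ (after one step the state is binary)
theorem traj_eq (d : Nat) (s : List Int) (h0 : s.length ≠ 1)
    (hbd : s = [] ∨ ((s.getD 1 0 = 0 ∨ s.getD 1 0 = 1) ∧
      (s.getD (s.length - 2) 0 = 0 ∨ s.getD (s.length - 2) 0 = 1))) :
    innerA^[d] s = stepB^[d] s := by
  rcases s with _ | ⟨a, t⟩
  · rw [Function.iterate_fixed (show innerA [] = [] by decide) d,
      Function.iterate_fixed (show stepB [] = [] by decide) d]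
  rcases t with _ | ⟨b, l⟩
  · simp at h0
  obtain ⟨h1b, h2b⟩ : ((a :: b :: l).getD 1 0 = 0 ∨ (a :: b :: l).getD 1 0 = 1) ∧
      ((a :: b :: l).getD ((a :: b :: l).length - 2) 0 = 0 ∨
       (a :: b :: l).getD ((a :: b :: l).length - 2) 0 = 1) := by
    rcases hbd with h | h
    · simp at h
    · exact h
  have hn2 : 2 ≤ (a :: b :: l).length := by simp
  rcases d with _ | d
  · rfl
  · rw [Function.iterate_succ_apply, Function.iterate_succ_apply,
      innerA_eq_stepB_of_len _ (by simp [PySem.List.len_eq]; omega) h1b h2b]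
    exact traj_eq_bin d (stepB (a :: b :: l)) (by rw [stepB_length]; exact hn2)
      (stepB_binary _ hn2 h1b h2b)

-- ===== VERDICT (by name: the statement is the Claim_ definition above) =====
theorem cellCompete_spec : Claim_equal_cellCompete := by
  intro states days _ hpre
  show cellCompete states days = cellCompete_alt states days
  have hB : cellCompete_alt states days = stepB^[days.toNat] states := by
    unfold cellCompete_alt
    exact loopB_eq_iterate days.toNat PySem.Dict.empty 0 states
      (fun k v h => by simp [PySem.Dict.get?_empty] at h)
  rw [cellCompete_eq_iterate, hB]
  rcases hpre with hd | ⟨hl, hbd⟩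
  · rw [show days.toNat = 0 by omega]
    rfl
  · exact traj_eq days.toNat states hl hbd
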